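-- pv_equiv track=rewrite | github.com/hyeonjun/AlgorithmTest | Algorithm_Study/Algorithm_Type/Greedy_MainType.py | solution
-- ===== SOURCE A (Python) =====
-- def solution(n,k,censor):
--     if k >= n:
--         return 0
--     censor.sort()
--     distances = [censor[i]-censor[i-1] for i in range(1,n)]
--     distances.sort(reverse=True)
--     for _ in range(k-1):
--         distances.pop(0)
--     return sum(distances)
-- ===== SOURCE B (Python) =====
-- def solution(n, k, censor):
--     if k >= n:
--         return 0
--     censor.sort()
--     if n <= 1:
--         return 0
--     pts = censor[:n]
--     # dp[i] = minimal total covered length for points pts[0..i] with (at most) one group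
--     dp = [pts[i] - pts[0] for i in range(n)]
--     for _ in range(k - 1):
--         # allow one more group: ndp[i] = pts[i] + min_{t<i}(dp[t] - pts[t+1]),
--         # with the prefix minimum carried in `best` (one pass per layer)
--         ndp = [0]
--         best = dp[0] - pts[1]
--         ndp.append(pts[1] + best)
--         for i in range(2, n):
--             cand = dp[i - 1] - pts[i]
--             if cand < best:
--                 best = cand
--             ndp.append(pts[i] + best)
--         dp = ndp
--     return dp[n - 1]
-- ===== Notes on version B (the rewrite author's own statement) =====
-- stated objective: alternative
-- what changed: Replaces A's greedy gap selection (sort the gaps descending, pop off the k-1 largest, sum the rest) with an interval-partition dynamic program over prefixes of the sorted points: dp[i] = minimal covered length for the first i+1 points, one layer per extra group, each layer a single pass carrying a running prefix-minimum; B never sorts or selects gaps at all.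
import Mathlib
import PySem

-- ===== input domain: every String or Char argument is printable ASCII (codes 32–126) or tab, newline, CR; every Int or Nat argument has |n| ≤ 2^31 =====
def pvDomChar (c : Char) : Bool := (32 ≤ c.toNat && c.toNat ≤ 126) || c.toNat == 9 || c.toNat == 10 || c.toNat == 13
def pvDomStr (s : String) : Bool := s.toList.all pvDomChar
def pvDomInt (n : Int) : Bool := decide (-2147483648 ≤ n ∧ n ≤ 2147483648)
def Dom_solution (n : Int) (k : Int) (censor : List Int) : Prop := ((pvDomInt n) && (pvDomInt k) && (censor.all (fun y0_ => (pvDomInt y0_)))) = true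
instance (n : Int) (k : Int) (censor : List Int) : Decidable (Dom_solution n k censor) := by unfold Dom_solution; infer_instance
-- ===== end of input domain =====

-- B replaces A's greedy gap selection with an interval-partition dynamic program (one dp layer per
-- extra group, each a single pass with a running prefix-minimum); objective: alternative algorithm,
-- not faster. Both A and B sort `censor` in place; the equivalence proved is about the return value.

-- ===== PORT A =====
def solution (n : Int) (k : Int) (censor : List Int) : Int :=
  if k ≥ n then 0
  else
    let cs := PySem.List.sorted censor (fun x => x) false
    let distances := (PySem.List.pyRange 1 n 1).map
      (fun i => (PySem.List.pyGet? cs i).getD 0 - (PySem.List.pyGet? cs (i-1)).getD 0)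
    let distances := PySem.List.sorted distances (fun x => x) true
    -- for _ in range(k-1): distances.pop(0)   (pop(0) never faces [] inside Pre_)
    let distances := (PySem.List.pyRange 0 (k-1) 1).foldl
      (fun ds _ => match PySem.List.pop? ds 0 with | some (_, rest) => rest | none => ds) distances
    distances.sum

-- ===== PORT B =====
-- one dp layer: ndp[i] = pts[i] + min_{t<i}(dp[t] - pts[t+1]), prefix-min carried in the fold state
def pvLayer (pts : List Int) (n : Int) (dp : List Int) : List Int :=
  let best0 := (PySem.List.pyGet? dp 0).getD 0 - (PySem.List.pyGet? pts 1).getD 0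
  let st := (PySem.List.pyRange 2 n 1).foldl
    (fun (st : List Int × Int) i =>
      let cand := (PySem.List.pyGet? dp (i-1)).getD 0 - (PySem.List.pyGet? pts i).getD 0
      let best := if cand < st.2 then cand else st.2
      (st.1 ++ [(PySem.List.pyGet? pts i).getD 0 + best], best))
    ([0, (PySem.List.pyGet? pts 1).getD 0 + best0], best0)
  st.1

def solution_alt (n : Int) (k : Int) (censor : List Int) : Int :=
  if k ≥ n then 0
  else
    let cs := PySem.List.sorted censor (fun x => x) false
    if n ≤ 1 then 0
    else
      let pts := PySem.List.slice cs none (some n)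
      let dp0 := (PySem.List.pyRange 0 n 1).map
        (fun i => (PySem.List.pyGet? pts i).getD 0 - (PySem.List.pyGet? pts 0).getD 0)
      let dp := (PySem.List.pyRange 0 (k-1) 1).foldl (fun d _ => pvLayer pts n d) dp0
      (PySem.List.pyGet? dp (n-1)).getD 0

-- ===== PRECONDITION & SPEC =====
-- Pre_ excludes exactly the inputs on which A raises IndexError: 2 ≤ n with fewer than n elements
-- (censor[i] out of range while building the gap list).
def Pre_solution (n : Int) (k : Int) (censor : List Int) : Prop :=
  k ≥ n ∨ n ≤ 1 ∨ n ≤ (censor.length : Int)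
instance (n : Int) (k : Int) (censor : List Int) : Decidable (Pre_solution n k censor) := by
  unfold Pre_solution; infer_instance
def pvWitness_solution : Int × Int × List Int := (3, 1, [1, 5, 2])

def Spec_solution (n : Int) (k : Int) (censor : List Int) (out : Int) : Prop := out = solution_alt n k censor
instance (n : Int) (k : Int) (censor : List Int) (out : Int) : Decidable (Spec_solution n k censor out) := by unfold Spec_solution; infer_instance

-- ===== CLAIM (what is proved, stated in full; the proofs are below) =====
def Claim_equal_solution : Prop := ∀ (n : Int) (k : Int) (censor : List Int), Dom_solution n k censor → Pre_solution n k censor → Spec_solution n k censor (solution n k censor)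

-- ===== LEMMAS AND PROOFS =====

-- sum of the r largest elements (take r of the descending sort)
def pvTop (r : Nat) (xs : List Int) : Int :=
  ((PySem.List.sorted xs (fun x => x) true).take r).sum

-- t-th gap of the point list
def pvG (pts : List Int) (t : Nat) : Int := pts.getD (t+1) 0 - pts.getD t 0

-- first i gaps
def pvGs (pts : List Int) (i : Nat) : List Int := (List.range i).map (pvG pts)

-- dp value: cover pts[0..i] with at most L+1 groups
def pvF (pts : List Int) (L : Nat) (i : Nat) : Int :=
  pts.getD i 0 - pts.getD 0 0 - pvTop L (pvGs pts i)

theorem pv_top_nil (r : Nat) : pvTop r [] = 0 := by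
  unfold pvTop
  rw [List.Perm.eq_nil (PySem.List.sorted_perm [] (fun x => x) true)]
  simp

theorem pv_top_zero (xs : List Int) : pvTop 0 xs = 0 := by
  simp [pvTop]

theorem pv_top_singleton (r : Nat) (x : Int) : pvTop (r+1) [x] = x := by
  unfold pvTop
  rw [List.perm_singleton.1 (PySem.List.sorted_perm [x] (fun x => x) true)]
  simp

-- any (l.take (s+1)).sum is at most a + (l.take s).sum when a dominates l and 0 ≤ a
theorem pv_take_succ_le (l : List Int) (s : Nat) (a : Int)
    (hdom : ∀ x ∈ l, x ≤ a) (ha : 0 ≤ a) :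
    (l.take (s+1)).sum ≤ a + (l.take s).sum := by
  rcases Nat.lt_or_ge s l.length with hs | hs
  · rw [List.take_add_one, List.getElem?_eq_getElem hs]
    simp only [Option.toList_some, List.sum_append, List.sum_cons, List.sum_nil]
    have := hdom l[s] (List.getElem_mem hs)
    linarith
  · rw [List.take_of_length_le hs, List.take_of_length_le (by omega)]
    linarith

-- a positional sublist of a descending, nonnegative list is bounded by the prefix of its length
theorem pv_sublist_sum_le (d ys : List Int) (hs : ys.Sublist d) :
    d.Pairwise (fun a b => b ≤ a) → (∀ x ∈ d, 0 ≤ x) → ys.sum ≤ (d.take ys.length).sum := by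
  induction hs with
  | slnil => intro _ _; simp
  | @cons l₂ l₁ a hsub ih =>
    intro hp h0
    have hpc := List.pairwise_cons.1 hp
    have ih' := ih hpc.2 (fun x hx => h0 x (List.mem_cons_of_mem _ hx))
    have ha : (0:Int) ≤ a := h0 a List.mem_cons_self
    cases l₂ with
    | nil => simp
    | cons b t =>
      have hstep := pv_take_succ_le l₁ (b :: t).length.pred a hpc.1 ha
      simp only [List.length_cons, Nat.pred_succ] at hstep
      calc (b :: t).sum ≤ (l₁.take (b :: t).length).sum := ih'
        _ = (l₁.take (t.length + 1)).sum := by simp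
        _ ≤ a + (l₁.take t.length).sum := hstep
        _ = ((a :: l₁).take (b :: t).length).sum := by simp
  | @cons₂ l₂ l₁ a hsub ih =>
    intro hp h0
    have hpc := List.pairwise_cons.1 hp
    have ih' := ih hpc.2 (fun x hx => h0 x (List.mem_cons_of_mem _ hx))
    simp only [List.sum_cons, List.length_cons, List.take_succ_cons]
    linarith

theorem pv_take_sum_mono (d : List Int) (h0 : ∀ x ∈ d, 0 ≤ x) {r s : Nat} (h : r ≤ s) :
    (d.take r).sum ≤ (d.take s).sum := by
  have hd : d.take s = d.take r ++ (d.drop r).take (s - r) := by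
    rw [← List.take_add]
    congr 1
    omega
  rw [hd, List.sum_append]
  have h2 : 0 ≤ ((d.drop r).take (s-r)).sum :=
    List.sum_nonneg (fun x hx => h0 x (List.drop_subset r d (List.take_subset _ _ hx)))
  linarith

-- any sub-multiset of xs of size ≤ r is bounded by the r largest
theorem pv_subperm_sum_le (xs ys : List Int) (r : Nat) (h0 : ∀ x ∈ xs, 0 ≤ x)
    (hl : ys.length ≤ r) (hs : ys.Subperm xs) : ys.sum ≤ pvTop r xs := by
  obtain ⟨l, hperm, hsub⟩ :=
    hs.trans ((PySem.List.sorted_perm xs (fun x => x) true).symm.subperm)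
  have hp : (PySem.List.sorted xs (fun x => x) true).Pairwise (fun a b => b ≤ a) :=
    PySem.List.sorted_pairwise_rev xs (fun x => x)
  have h0' : ∀ x ∈ PySem.List.sorted xs (fun x => x) true, 0 ≤ x := by
    intro x hx
    exact h0 x ((PySem.List.mem_sorted xs (fun x => x) true x).1 hx)
  have h1 := pv_sublist_sum_le _ _ hsub hp h0'
  have h2 := pv_take_sum_mono (PySem.List.sorted xs (fun x => x) true) h0'
    (hperm.length_eq ▸ hl : l.length ≤ r)
  calc ys.sum = l.sum := (hperm.sum_eq).symm
    _ ≤ _ := h1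
    _ ≤ _ := h2

-- incremental exchange: the r+1 largest of xs ++ [a]
theorem pv_top_snoc (xs : List Int) (a : Int) (r : Nat)
    (h0 : ∀ x ∈ xs, 0 ≤ x) (ha : 0 ≤ a) :
    pvTop (r+1) (xs ++ [a]) = max (pvTop (r+1) xs) (pvTop r xs + a) := by
  have h0' : ∀ x ∈ xs ++ [a], 0 ≤ x := by
    intro x hx
    rcases List.mem_append.1 hx with h | h
    · exact h0 x h
    · simp only [List.mem_singleton] at h
      omega
  apply le_antisymm
  · -- upper bound: the selected r+1 largest of xs ++ [a] split into a part in xs and possibly a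
    have hsub : ((PySem.List.sorted (xs ++ [a]) (fun x => x) true).take (r+1)).Subperm (xs ++ [a]) :=
      (List.take_sublist _ _).subperm.trans (PySem.List.sorted_perm _ (fun x => x) true).subperm
    obtain ⟨l, hperm, hsl⟩ := hsub
    have hlen : l.length ≤ r + 1 := by
      rw [hperm.length_eq]
      simp
    have hsum : pvTop (r+1) (xs ++ [a]) = l.sum := (hperm.sum_eq).symm
    rw [List.sublist_append_iff] at hsl
    obtain ⟨l1, l2, rfl, hs1, hs2⟩ := hsl
    rcases List.sublist_singleton.1 hs2 with rfl | rfl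
    · have := pv_subperm_sum_le xs l1 (r+1) h0 (by simpa using hlen) hs1.subperm
      simp only [List.append_nil] at hsum
      rw [hsum]
      exact le_max_of_le_left this
    · have hl1 : l1.length ≤ r := by
        simp only [List.length_append, List.length_singleton] at hlen
        omega
      have := pv_subperm_sum_le xs l1 r h0 hl1 hs1.subperm
      rw [hsum]
      simp only [List.sum_append, List.sum_singleton]
      exact le_max_of_le_right (by linarith)
  · apply max_le
    · have hsub : ((PySem.List.sorted xs (fun x => x) true).take (r+1)).Subperm (xs ++ [a]) :=
        ((List.take_sublist _ _).subperm.trans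
          (PySem.List.sorted_perm xs (fun x => x) true).subperm).trans
          (List.sublist_append_left xs [a]).subperm
      exact pv_subperm_sum_le (xs ++ [a]) _ (r+1) h0'
        (by simp) hsub
    · have hsub : (((PySem.List.sorted xs (fun x => x) true).take r) ++ [a]).Subperm (xs ++ [a]) :=
        (List.subperm_append_right [a]).2
          ((List.take_sublist _ _).subperm.trans
            (PySem.List.sorted_perm xs (fun x => x) true).subperm)
      have := pv_subperm_sum_le (xs ++ [a]) _ (r+1) h0'
        (by simp) hsub
      simpa using this

theorem pv_gs_succ (pts : List Int) (i : Nat) :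
    pvGs pts (i+1) = pvGs pts i ++ [pvG pts i] := by
  simp [pvGs, List.range_succ]

theorem pv_gs_sum (pts : List Int) (i : Nat) :
    (pvGs pts i).sum = pts.getD i 0 - pts.getD 0 0 := by
  induction i with
  | zero => simp [pvGs]
  | succ i ih =>
    rw [pv_gs_succ, List.sum_append, ih]
    simp [pvG]

theorem pv_gs_nonneg (pts : List Int) (i : Nat) (hsort : pts.Pairwise (· ≤ ·))
    (hi : i < pts.length) : ∀ x ∈ pvGs pts i, 0 ≤ x := by
  intro x hx
  simp only [pvGs, List.mem_map, List.mem_range] at hx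
  obtain ⟨t, ht, rfl⟩ := hx
  have h1 : t + 1 < pts.length := by omega
  have h2 := List.pairwise_iff_getElem.1 hsort t (t+1) (by omega) h1 (by omega)
  rw [pvG, List.getD_eq_getElem?_getD, List.getD_eq_getElem?_getD,
    List.getElem?_eq_getElem h1, List.getElem?_eq_getElem (show t < pts.length by omega)]
  simp only [Option.getD_some]
  linarith

-- the pop(0) body is List.tail
theorem pv_pop_body (ds : List Int) :
    (match PySem.List.pop? ds 0 with | some (_, rest) => rest | none => ds) = ds.tail := by
  cases ds <;> simp [PySem.List.pop?, PySem.List.pyIdx?]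

-- folding 'tail' over any list drops its length
theorem pv_foldl_tail {α β : Type} (xs : List α) (l : List β) :
    xs.foldl (fun acc _ => acc.tail) l = l.drop xs.length := by
  induction xs generalizing l with
  | nil => simp
  | cons x xs ih => simp [List.foldl_cons, ih]

theorem pv_foldl_const {α β : Type} (f : α → α) (xs : List β) (a : α) :
    xs.foldl (fun s _ => f s) a = f^[xs.length] a := by
  induction xs generalizing a with
  | nil => simp
  | cons x xs ih => simp [List.foldl_cons, ih, Function.iterate_succ_apply]

-- indexing helpers
theorem pv_getn (xs : List Int) (t : Nat) :
    (PySem.List.pyGet? xs ((t : Nat) : Int)).getD 0 = xs.getD t 0 := by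
  rw [PySem.List.pyGet?_natCast, List.getD_eq_getElem?_getD]

theorem pv_get_map_nat (m : Nat) (f : Nat → Int) (t : Nat) (ht : t < m) :
    (PySem.List.pyGet? ((List.range m).map f) ((t : Nat) : Int)).getD 0 = f t := by
  rw [PySem.List.pyGet?_natCast]
  simp [List.getElem?_map, List.getElem?_range ht]

theorem pv_F_zero (pts : List Int) (L : Nat) : pvF pts L 0 = 0 := by
  simp [pvF, pvGs, pv_top_nil]

theorem pv_F_one (pts : List Int) (L : Nat) : pvF pts (L+1) 1 = 0 := by
  have h1 : pvGs pts 1 = [pvG pts 0] := by simp [pvGs]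
  simp [pvF, h1, pv_top_singleton, pvG]

-- the inner single pass of a dp layer, characterised
theorem pv_inner (pts : List Int) (m : Nat) (hm : 2 ≤ m) (hlen : pts.length = m)
    (hsort : pts.Pairwise (· ≤ ·)) (L : Nat) (j : Nat) (h2 : 2 ≤ j) (hj : j ≤ m) :
    (PySem.List.pyRange 2 (j : Int) 1).foldl
      (fun (st : List Int × Int) i =>
        (st.1 ++ [(PySem.List.pyGet? pts i).getD 0
            + (if (PySem.List.pyGet? ((List.range m).map (pvF pts L)) (i-1)).getD 0
                  - (PySem.List.pyGet? pts i).getD 0 < st.2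
               then (PySem.List.pyGet? ((List.range m).map (pvF pts L)) (i-1)).getD 0
                  - (PySem.List.pyGet? pts i).getD 0
               else st.2)],
         if (PySem.List.pyGet? ((List.range m).map (pvF pts L)) (i-1)).getD 0
              - (PySem.List.pyGet? pts i).getD 0 < st.2
         then (PySem.List.pyGet? ((List.range m).map (pvF pts L)) (i-1)).getD 0
              - (PySem.List.pyGet? pts i).getD 0
         else st.2))
      ([0, (PySem.List.pyGet? pts 1).getD 0
          + ((PySem.List.pyGet? ((List.range m).map (pvF pts L)) 0).getD 0
             - (PySem.List.pyGet? pts 1).getD 0)],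
       (PySem.List.pyGet? ((List.range m).map (pvF pts L)) 0).getD 0
         - (PySem.List.pyGet? pts 1).getD 0)
    = ((List.range j).map (pvF pts (L+1)),
       - pts.getD 0 0 - pvTop (L+1) (pvGs pts (j-1))) := by
  have hg0 : (PySem.List.pyGet? ((List.range m).map (pvF pts L)) (0:Int)).getD 0 = 0 := by
    simpa [pv_F_zero] using pv_get_map_nat m (pvF pts L) 0 (by omega)
  have hp1 : (PySem.List.pyGet? pts (1:Int)).getD 0 = pts.getD 1 0 := by
    simpa using pv_getn pts 1
  revert hj
  induction j, h2 using Nat.le_induction with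
  | base =>
    intro _
    rw [show ((2:Nat):Int) = 2 from rfl, PySem.List.pyRange_one_eq_nil (le_refl 2)]
    simp only [List.foldl_nil, Prod.mk.injEq]
    have hGs1 : pvGs pts 1 = [pvG pts 0] := by simp [pvGs]
    constructor
    · rw [show List.range 2 = [0, 1] from rfl]
      simp only [List.map_cons, List.map_nil, pv_F_zero, pv_F_one, hg0, hp1]
      norm_num
    · rw [hg0, hp1, hGs1, pv_top_singleton, pvG]
      simp
      omega
  | succ j hj2 ih =>
    intro hj1
    have hjm : j < m := by omega
    have hcast : ((j+1 : Nat) : Int) = (j:Int) + 1 := by push_cast; ring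
    rw [hcast, PySem.List.pyRange_one_succ_right (by exact_mod_cast hj2),
      List.foldl_append, ih (by omega)]
    simp only [List.foldl_cons, List.foldl_nil]
    have e1 : ((j:Int) - 1) = ((j-1 : Nat) : Int) := by
      have : 1 ≤ j := by omega
      push_cast [this]
      ring
    rw [e1, pv_get_map_nat m _ (j-1) (by omega), pv_getn pts j]
    -- gap facts
    have hGj : pvGs pts j = pvGs pts (j-1) ++ [pvG pts (j-1)] := by
      have h := pv_gs_succ pts (j-1)
      rw [show j-1+1 = j by omega] at h
      exact h
    have hGnn : ∀ x ∈ pvGs pts (j-1), 0 ≤ x :=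
      pv_gs_nonneg pts (j-1) hsort (by omega)
    have hgnn : 0 ≤ pvG pts (j-1) := by
      refine pv_gs_nonneg pts j hsort (by omega) _ ?_
      simp only [pvGs, List.mem_map, List.mem_range]
      exact ⟨j-1, by omega, rfl⟩
    have hsnoc := pv_top_snoc (pvGs pts (j-1)) (pvG pts (j-1)) L hGnn hgnn
    have hgdef : pvG pts (j-1) = pts.getD j 0 - pts.getD (j-1) 0 := by
      rw [pvG, show j-1+1 = j by omega]
    have hbest :
        (if pvF pts L (j-1) - pts.getD j 0
            < - pts.getD 0 0 - pvTop (L+1) (pvGs pts (j-1))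
         then pvF pts L (j-1) - pts.getD j 0
         else - pts.getD 0 0 - pvTop (L+1) (pvGs pts (j-1)))
        = - pts.getD 0 0 - pvTop (L+1) (pvGs pts j) := by
      rw [hGj, hsnoc, pvF]
      rw [hgdef] at hsnoc ⊢
      split_ifs with h <;> omega
    simp only [Prod.mk.injEq]
    refine ⟨?_, by rw [hbest, show j+1-1 = j by omega]⟩
    rw [hbest, List.range_succ, List.map_append, List.map_singleton]
    congr 1
    rw [pvF]
    congr 1
    omega

theorem pv_layer_correct (pts : List Int) (m : Nat) (hm : 2 ≤ m) (hlen : pts.length = m)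
    (hsort : pts.Pairwise (· ≤ ·)) (L : Nat) :
    pvLayer pts (m : Int) ((List.range m).map (pvF pts L))
      = (List.range m).map (pvF pts (L+1)) := by
  have h := pv_inner pts m hm hlen hsort L m hm le_rfl
  simp only [pvLayer]
  rw [h]

theorem pv_iter (pts : List Int) (m : Nat) (hm : 2 ≤ m) (hlen : pts.length = m)
    (hsort : pts.Pairwise (· ≤ ·)) (K : Nat) :
    (fun d => pvLayer pts (m : Int) d)^[K] ((List.range m).map (pvF pts 0))
      = (List.range m).map (pvF pts K) := by
  induction K with
  | zero => simp
  | succ K ih => rw [Function.iterate_succ_apply', ih, pv_layer_correct pts m hm hlen hsort]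

-- ===== VERDICT (by name: the statement is the Claim_ definition above) =====
theorem solution_spec : Claim_equal_solution := by
  intro n k censor _ hpre
  unfold Spec_solution solution solution_alt
  by_cases hk : k ≥ n
  · simp [hk]
  · simp only [if_neg hk]
    by_cases hn1 : n ≤ 1
    · have hsnil : PySem.List.sorted ([] : List Int) (fun x => x) true = [] :=
        List.Perm.eq_nil (PySem.List.sorted_perm [] (fun x => x) true)
      simp [if_pos hn1, PySem.List.pyRange_one_eq_nil (show n ≤ 1 from hn1), pv_pop_body,
        pv_foldl_tail, hsnil]
    · simp only [if_neg hn1]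
      have hn2 : 2 ≤ n := by omega
      set cs := PySem.List.sorted censor (fun x => x) false with hcs
      have hcslen : cs.length = censor.length := PySem.List.length_sorted censor (fun x => x) false
      have hlenc : n ≤ (cs.length : Int) := by
        rw [hcslen]
        rcases hpre with h | h | h <;> omega
      set m := n.toNat with hmdef
      have hnm : ((m : Nat) : Int) = n := Int.toNat_of_nonneg (by omega)
      have hm2 : 2 ≤ m := by omega
      set pts := PySem.List.slice cs none (some n) with hpts
      have hptseq : pts = cs.take m := by
        rw [hpts, PySem.List.slice_to cs (by omega)]
      have hptslen : pts.length = m := by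
        rw [hptseq, List.length_take]
        omega
      have hsort : pts.Pairwise (· ≤ ·) := by
        rw [hptseq]
        exact (PySem.List.sorted_pairwise censor (fun x => x)).sublist (List.take_sublist m cs)
      set K := (k-1).toNat with hKdef
      have hp0 : (PySem.List.pyGet? pts (0:Int)).getD 0 = pts.getD 0 0 := by
        simpa using pv_getn pts 0
      -- the per-index getD agreement between pts and cs
      have hg : ∀ s : Nat, s < m → pts.getD s 0 = cs.getD s 0 := by
        intro s hs
        rw [hptseq, List.getD_eq_getElem?_getD, List.getD_eq_getElem?_getD]
        congr 1
        rw [List.getElem?_take]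
        simp [hs]
      -- A's gap list is the full gap list of pts
      have hD : (PySem.List.pyRange 1 n 1).map
          (fun i => (PySem.List.pyGet? cs i).getD 0 - (PySem.List.pyGet? cs (i-1)).getD 0)
          = pvGs pts (m-1) := by
        rw [PySem.List.pyRange_one, show ((n:Int) - 1).toNat = m - 1 by omega]
        unfold pvGs
        rw [List.map_map]
        apply List.map_congr_left
        intro t ht
        simp only [List.mem_range] at ht
        simp only [Function.comp]
        have e2 : (1:Int) + (t:Int) - 1 = ((t : Nat) : Int) := by ring
        have e1 : (1:Int) + (t:Int) = ((t+1 : Nat) : Int) := by push_cast; ring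
        rw [e2, e1, pv_getn cs (t+1), pv_getn cs t, pvG,
          hg (t+1) (by omega), hg t (by omega)]
      -- A's pop loop is a drop of K elements
      have hbody : (fun (ds : List Int) (_ : Int) =>
          (match PySem.List.pop? ds 0 with | some (_, rest) => rest | none => ds)) =
          fun ds _ => ds.tail := by
        funext ds i
        exact pv_pop_body ds
      rw [hD, hbody, pv_foldl_tail, PySem.List.length_pyRange_one,
        show (k-1-0).toNat = K by omega]
      -- B's initial dp row
      have hdp0 : (PySem.List.pyRange 0 n 1).map
          (fun i => (PySem.List.pyGet? pts i).getD 0 - (PySem.List.pyGet? pts 0).getD 0)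
          = (List.range m).map (pvF pts 0) := by
        rw [← hnm, PySem.List.pyRange_one, show (((m:Nat):Int) - 0).toNat = m by omega,
          List.map_map]
        apply List.map_congr_left
        intro t ht
        simp only [Function.comp, zero_add]
        rw [pv_getn pts t, hp0, pvF, pv_top_zero]
        omega
      rw [hdp0]
      -- B's layer loop
      have houter : (PySem.List.pyRange 0 (k-1) 1).foldl (fun d _ => pvLayer pts n d)
            ((List.range m).map (pvF pts 0)) = (List.range m).map (pvF pts K) := by
        rw [← hnm, pv_foldl_const (fun d => pvLayer pts ((m:Nat):Int) d),
          PySem.List.length_pyRange_one, show (k-1-0).toNat = K by omega]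
        exact pv_iter pts m hm2 hptslen hsort K
      rw [houter, show n - 1 = ((m-1 : Nat) : Int) by omega,
        pv_get_map_nat m (pvF pts K) (m-1) (by omega)]
      -- both sides are (sum of all gaps) minus (sum of the K largest gaps)
      have h1 : ((PySem.List.sorted (pvGs pts (m-1)) (fun x => x) true).take K).sum
          + ((PySem.List.sorted (pvGs pts (m-1)) (fun x => x) true).drop K).sum
          = (PySem.List.sorted (pvGs pts (m-1)) (fun x => x) true).sum := by
        rw [← List.sum_append, List.take_append_drop]
      have h2 : (PySem.List.sorted (pvGs pts (m-1)) (fun x => x) true).sum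
          = (pvGs pts (m-1)).sum :=
        (PySem.List.sorted_perm (pvGs pts (m-1)) (fun x => x) true).sum_eq
      have h3 := pv_gs_sum pts (m-1)
      rw [pvF]
      unfold pvTop at *
      omega
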